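-- pv_equiv track=rewrite | github.com/jayPreak/dsa | old/google/apr15/A3.py | find_color_order
-- ===== SOURCE A (Python) =====
-- def find_color_order(N, colors):
--     last_color = colors[0]
--     color_order = [last_color]
--     impossible = False
--
--     for i in range(1, N):
--         if colors[i] != last_color:
--             if last_color > colors[i]:
--                 impossible = True
--                 break
--             last_color = colors[i]
--             color_order.append(last_color)
--
--     if impossible:
--         return "IMPOSSIBLE"
--     else:
--         return " ".join(str(color) for color in color_order)
-- ===== SOURCE B (Python) =====
-- def find_color_order(N, colors):
--     prefix = colors[:N] if N > 1 else [colors[0]]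
--     if sorted(prefix) != prefix:
--         return "IMPOSSIBLE"
--     return " ".join(str(c) for c in sorted(set(prefix)))
-- ===== Notes on version B (the rewrite author's own statement) =====
-- stated objective: alternative
-- what changed: replaces A's stateful compression scan (last_color/impossible flag with early break) by a sorting-based formulation: the order is possible iff the prefix equals its sorted self, and then the answer is exactly the sorted distinct colors, so B computes sorted(set(prefix)) instead of run-compressing
import Mathlib
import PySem

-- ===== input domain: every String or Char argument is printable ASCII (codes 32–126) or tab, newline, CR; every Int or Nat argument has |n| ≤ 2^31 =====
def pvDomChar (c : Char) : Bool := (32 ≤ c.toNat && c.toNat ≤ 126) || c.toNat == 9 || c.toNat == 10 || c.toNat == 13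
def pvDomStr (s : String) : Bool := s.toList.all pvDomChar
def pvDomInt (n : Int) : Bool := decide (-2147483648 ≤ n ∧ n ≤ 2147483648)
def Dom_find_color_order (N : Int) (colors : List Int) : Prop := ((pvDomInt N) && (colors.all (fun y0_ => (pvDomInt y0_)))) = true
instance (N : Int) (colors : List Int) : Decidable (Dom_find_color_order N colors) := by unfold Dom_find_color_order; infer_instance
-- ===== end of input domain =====

-- B replaces A's compression scan by a sorting-based formulation (possible iff prefix == sorted(prefix); answer = sorted(set(prefix))); return values only.
-- ===== PORT A =====
-- A's 'for i in range(1, N)' with its two-way branch and 'break'; Python's range is lazy, so the loop is an index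
-- recursion: it stops at the break, at i = N, or where colors[i] would raise IndexError (pyGet? = none, outside Pre_).
-- Result = (color_order, impossible).
def aLoop (colors : List Int) (N : Int) (i last : Int) (order : List Int) : List Int × Bool :=
  if _h : i < N then
    match PySem.List.pyGet? colors i with
    | none => (order, false)   -- Python raises IndexError here (excluded by Pre_)
    | some c =>
      if c ≠ last then
        if last > c then (order, true)
        else aLoop colors N (i + 1) c (order ++ [c])
      else aLoop colors N (i + 1) last order
  else (order, false)
termination_by (N - i).toNat
decreasing_by all_goals omega

def find_color_order (N : Int) (colors : List Int) : String :=
  let last_color := PySem.List.pyGetD colors 0 0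
  let r := aLoop colors N 1 last_color [last_color]
  if r.2 then "IMPOSSIBLE"
  else PySem.Str.join " " (r.1.map PySem.Int.toStr)

-- ===== PORT B =====
-- Source B: prefix = colors[:N] if N > 1 else [colors[0]]; IMPOSSIBLE iff sorted(prefix) != prefix; else join sorted(set(prefix))
def find_color_order_alt (N : Int) (colors : List Int) : String :=
  let prefixL := if N > 1 then PySem.List.slice colors none (some N)
                 else [PySem.List.pyGetD colors 0 0]
  if PySem.List.sorted prefixL (fun x => x) false ≠ prefixL then "IMPOSSIBLE"
  else PySem.Str.join " "
    ((PySem.List.sorted (PySem.Set.ofList prefixL) (fun x => x) false).map PySem.Int.toStr)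

-- ===== PRECONDITION & SPEC =====
-- exactly the inputs where A returns: colors nonempty, and either N ≤ len(colors) or colors has an adjacent
-- strict decrease (then A breaks with "IMPOSSIBLE" before indexing out of range); otherwise A raises IndexError
def Pre_find_color_order (N : Int) (colors : List Int) : Prop :=
  colors ≠ [] ∧ (N ≤ (colors.length : Int) ∨ ¬ List.IsChain (· ≤ ·) colors)
instance (N : Int) (colors : List Int) : Decidable (Pre_find_color_order N colors) := by
  unfold Pre_find_color_order; infer_instance
def pvWitness_find_color_order : Int × List Int := (3, [1, 1, 2])

def Spec_find_color_order (N : Int) (colors : List Int) (out : String) : Prop :=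
  out = find_color_order_alt N colors
instance (N : Int) (colors : List Int) (out : String) : Decidable (Spec_find_color_order N colors out) := by
  unfold Spec_find_color_order; infer_instance

-- ===== CLAIM (what is proved, stated in full; the proofs are below) =====
def Claim_equal_find_color_order : Prop := ∀ (N : Int) (colors : List Int), Dom_find_color_order N colors → Pre_find_color_order N colors → Spec_find_color_order N colors (find_color_order N colors)

-- ===== LEMMAS AND PROOFS =====

-- adjacent compression of `l` relative to a previous value `last` (a characterisation of A's accumulator)
def cseq (last : Int) : List Int → List Int
  | [] => []
  | x :: xs => if x ≠ last then x :: cseq x xs else cseq last xs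

-- does A's scan hit a strict decrease?
def bad (last : Int) : List Int → Bool
  | [] => false
  | x :: xs => if x ≠ last then (if last > x then true else bad x xs) else bad last xs

-- A's loop, reformulated over the list of the values it actually reads
def runList : List Int → Int → List Int → List Int × Bool
  | [], _, order => (order, false)
  | c :: cs, last, order =>
    if c ≠ last then
      if last > c then (order, true)
      else runList cs c (order ++ [c])
    else runList cs last order

theorem runList_imp (l : List Int) : ∀ (last : Int) (order : List Int),
    (runList l last order).2 = bad last l := by
  induction l with
  | nil => intro last order; rfl
  | cons x xs ih =>
    intro last order
    by_cases hx : x = last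
    · simp [runList, bad, hx, ih]
    · by_cases hgt : last > x
      · simp [runList, bad, hx, hgt]
      · simp [runList, bad, hx, hgt, ih]

theorem runList_acc (l : List Int) : ∀ (last : Int) (order : List Int), bad last l = false →
    (runList l last order).1 = order ++ cseq last l := by
  induction l with
  | nil => intro last order _; simp [runList, cseq]
  | cons x xs ih =>
    intro last order hb
    by_cases hx : x = last
    · have hb' : bad last xs = false := by simpa [bad, hx] using hb
      simp [runList, cseq, hx, ih _ _ hb']
    · have hgt : ¬ last > x := by
        by_contra h
        simp [bad, hx, h] at hb
      have hb' : bad x xs = false := by simpa [bad, hx, hgt] using hb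
      simp [runList, cseq, hx, hgt, ih _ _ hb']

-- bridge, small-N case: with N ≤ len(colors) the loop reads exactly colors[i:N]
theorem aLoop_eq_runList (colors : List Int) (N : Int) (hlen : N ≤ (colors.length : Int)) :
    ∀ (n : Nat) (i last : Int) (order : List Int), 0 ≤ i → n = (N - i).toNat →
    aLoop colors N i last order = runList ((colors.drop i.toNat).take n) last order := by
  intro n
  induction n with
  | zero =>
    intro i last order h0 hn
    rw [aLoop]
    simp [show ¬ i < N by omega, runList]
  | succ n ih =>
    intro i last order h0 hn
    have hiN : i < N := by omega
    have hilen : i < (colors.length : Int) := by omega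
    rw [aLoop]
    rw [PySem.List.pyGet?_eq_some_getElem colors h0 hilen]
    have hdrop : colors.drop i.toNat = colors[i.toNat] :: colors.drop (i.toNat + 1) :=
      List.drop_eq_getElem_cons (by omega)
    have hi1 : (i + 1).toNat = i.toNat + 1 := by omega
    rw [hdrop, List.take_succ_cons]
    simp only [runList, dif_pos hiN]
    by_cases hx : colors[i.toNat] = last
    · simp [hx, ← hi1, ih (i + 1) last order (by omega) (by omega)]
    · by_cases hgt : last > colors[i.toNat]
      · simp [hx, hgt]
      · simp [hx, hgt, ← hi1,
          ih (i + 1) colors[i.toNat] (order ++ [colors[i.toNat]]) (by omega) (by omega)]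

-- bridge, large-N case: if a strict decrease is still ahead, the loop breaks before running off the end
theorem aLoop_eq_runList_big (colors : List Int) (N : Int) (hlen : (colors.length : Int) < N) :
    ∀ (n : Nat) (i last : Int) (order : List Int), 0 ≤ i → n = colors.length - i.toNat →
    bad last (colors.drop i.toNat) = true →
    aLoop colors N i last order = runList (colors.drop i.toNat) last order := by
  intro n
  induction n with
  | zero =>
    intro i last order h0 hn hbad
    rw [List.drop_eq_nil_of_le (by omega)] at hbad
    simp [bad] at hbad
  | succ n ih =>
    intro i last order h0 hn hbad
    have hilen : i < (colors.length : Int) := by omega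
    have hiN : i < N := by omega
    rw [aLoop]
    rw [PySem.List.pyGet?_eq_some_getElem colors h0 hilen]
    have hdrop : colors.drop i.toNat = colors[i.toNat] :: colors.drop (i.toNat + 1) :=
      List.drop_eq_getElem_cons (by omega)
    have hi1 : (i + 1).toNat = i.toNat + 1 := by omega
    rw [hdrop]
    simp only [runList, dif_pos hiN]
    by_cases hx : colors[i.toNat] = last
    · have hbad' : bad last (colors.drop (i.toNat + 1)) = true := by
        rw [hdrop] at hbad; simpa [bad, hx] using hbad
      simp [hx, ← hi1, ih (i + 1) last order (by omega) (by omega) (by rw [hi1]; exact hbad')]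
    · by_cases hgt : last > colors[i.toNat]
      · simp [hx, hgt]
      · have hbad' : bad colors[i.toNat] (colors.drop (i.toNat + 1)) = true := by
          rw [hdrop] at hbad; simpa [bad, hx, hgt] using hbad
        simp [hx, hgt, ← hi1,
          ih (i + 1) colors[i.toNat] (order ++ [colors[i.toNat]]) (by omega) (by omega)
            (by rw [hi1]; exact hbad')]

theorem bad_iff (l : List Int) : ∀ (last : Int), (bad last l = true ↔ ¬ List.IsChain (· ≤ ·) (last :: l)) := by
  induction l with
  | nil => intro last; simp [bad]
  | cons x xs ih =>
    intro last
    by_cases hx : x = last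
    · subst hx
      simp [bad, List.isChain_cons_cons, ih x]
    · by_cases hgt : last > x
      · simp [bad, hx, hgt, List.isChain_cons_cons]
      · have hle : last ≤ x := by omega
        simp [bad, hx, hgt, List.isChain_cons_cons, hle, ih x]

-- B's check: sorted(prefix) == prefix iff the prefix is a non-decreasing chain
theorem sorted_fix_iff (p : List Int) :
    PySem.List.sorted p (fun x => x) false = p ↔ List.IsChain (· ≤ ·) p := by
  constructor
  · intro h
    have hp := PySem.List.sorted_pairwise p (fun x => x)
    rw [h] at hp
    exact List.isChain_iff_pairwise.mpr hp
  · intro h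
    have hp : List.Pairwise (· ≤ ·) p := List.isChain_iff_pairwise.mp h
    exact PySem.List.sorted_eq_self_of_pairwise p (fun x => x) hp

-- unfolding equations for cseq
theorem cseq_cons_same (c : Int) (ys : List Int) : cseq c (c :: ys) = cseq c ys := by
  simp [cseq]

theorem cseq_cons_ne {c y : Int} (h : y ≠ c) (ys : List Int) :
    cseq c (y :: ys) = y :: cseq y ys := by
  simp [cseq, h]

-- the compressed list has the same members as the original
theorem mem_cseq (l : List Int) : ∀ (c x : Int), x ∈ c :: cseq c l ↔ x ∈ c :: l := by
  induction l with
  | nil => intro c x; simp [cseq]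
  | cons y ys ih =>
    intro c x
    by_cases hy : y = c
    · subst hy
      have h := ih y x
      rw [cseq_cons_same]
      simp only [List.mem_cons] at h ⊢
      tauto
    · have h := ih y x
      rw [cseq_cons_ne hy]
      simp only [List.mem_cons] at h ⊢
      tauto

-- on a non-decreasing list the compression is strictly increasing
theorem chain_cseq (l : List Int) : ∀ (c : Int), List.IsChain (· ≤ ·) (c :: l) →
    List.IsChain (· < ·) (c :: cseq c l) := by
  induction l with
  | nil => intro c _; simp [cseq]
  | cons y ys ih =>
    intro c hch
    rw [List.isChain_cons_cons] at hch
    by_cases hy : y = c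
    · subst hy
      simpa [cseq] using ih y hch.2
    · have hlt : c < y := lt_of_le_of_ne hch.1 (Ne.symm hy)
      have := ih y hch.2
      simp only [cseq, if_pos (by exact hy : y ≠ c)]
      exact List.isChain_cons_cons.mpr ⟨hlt, this⟩

-- on a non-decreasing prefix, sorted(set(prefix)) is exactly A's compressed color_order
theorem sorted_ofList_eq_cseq (c : Int) (l : List Int) (hch : List.IsChain (· ≤ ·) (c :: l)) :
    PySem.List.sorted (PySem.Set.ofList (c :: l)) (fun x => x) false = c :: cseq c l := by
  have hlt : (c :: cseq c l).Pairwise (· < ·) :=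
    List.isChain_iff_pairwise.mp (chain_cseq l c hch)

  apply PySem.List.sorted_eq_of_perm_of_pairwise_lt
  · apply List.perm_of_nodup_nodup_toFinset_eq
    · exact hlt.imp ne_of_lt
    · exact PySem.Set.nodup_ofList _
    · ext a
      have h := mem_cseq l c a
      simp only [List.mem_cons] at h
      simp only [List.mem_toFinset, PySem.Set.mem_ofList, List.mem_cons]
      tauto
  · exact hlt

-- a singleton is fixed by sorted and by set()
theorem sorted_singleton (c : Int) : PySem.List.sorted [c] (fun x => x) false = [c] :=
  PySem.List.sorted_eq_self_of_pairwise [c] (fun x => x) (by simp)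

theorem ofList_singleton (c : Int) : PySem.Set.ofList [c] = [c] := rfl

theorem find_color_order_eq_alt (N : Int) (colors : List Int)
    (hne : colors ≠ []) (hN : N ≤ (colors.length : Int)) :
    find_color_order N colors = find_color_order_alt N colors := by
  obtain ⟨c, rest, rfl⟩ := List.exists_cons_of_ne_nil hne
  by_cases h1 : N ≤ 1
  · -- the loop is empty / B takes the [colors[0]] branch: both return str(colors[0])
    simp only [find_color_order, find_color_order_alt]
    rw [aLoop]
    simp [show ¬ (1:Int) < N by omega,
      PySem.List.pyGetD_zero_cons, sorted_singleton, ofList_singleton]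
  · have h1' : 1 < N := by omega
    set l : List Int := rest.take (N.toNat - 1) with hl
    have hbridge : aLoop (c :: rest) N 1 c [c] = runList l c [c] := by
      rw [aLoop_eq_runList (c :: rest) N hN (N - 1).toNat 1 c [c] (by omega) (by omega)]
      congr 1
      simp only [Int.toNat_one, List.drop_succ_cons, List.drop_zero, hl]
      congr 1
      omega
    have hslice : PySem.List.slice (c :: rest) none (some N) = c :: l := by
      have : N = ((N.toNat : Nat) : Int) := by omega
      rw [this, PySem.List.slice_to_natCast]
      have htk : N.toNat = (N.toNat - 1) + 1 := by omega
      rw [htk]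
      simp [hl]
    simp only [find_color_order, find_color_order_alt, hbridge, hslice,
      PySem.List.pyGetD_zero_cons, if_pos h1']
    have himp := runList_imp l c [c]
    by_cases hbad : bad c l = true
    · have hch : ¬ List.IsChain (· ≤ ·) (c :: l) := (bad_iff l c).mp hbad
      have hs : PySem.List.sorted (c :: l) (fun x => x) false ≠ c :: l := by
        intro h; exact hch ((sorted_fix_iff _).mp h)
      simp [himp, hbad, hs]
    · have hbad' : bad c l = false := by simpa using hbad
      have hch : List.IsChain (· ≤ ·) (c :: l) := by
        by_contra h; exact hbad ((bad_iff l c).mpr h)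
      have hs : PySem.List.sorted (c :: l) (fun x => x) false = c :: l :=
        (sorted_fix_iff _).mpr hch
      simp [himp, hbad', hs, runList_acc l c [c] hbad', sorted_ofList_eq_cseq c l hch]

theorem find_color_order_eq_alt_big (N : Int) (colors : List Int)
    (hne : colors ≠ []) (hN : (colors.length : Int) < N) (hch : ¬ List.IsChain (· ≤ ·) colors) :
    find_color_order N colors = find_color_order_alt N colors := by
  obtain ⟨c, rest, rfl⟩ := List.exists_cons_of_ne_nil hne
  have h1' : 1 < N := by simp at hN; omega
  have hbad : bad c rest = true := (bad_iff rest c).mpr hch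
  have hbridge : aLoop (c :: rest) N 1 c [c] = runList rest c [c] := by
    rw [aLoop_eq_runList_big (c :: rest) N hN rest.length 1 c [c] (by omega) (by simp)
      (by simpa using hbad)]
    simp
  have hslice : PySem.List.slice (c :: rest) none (some N) = c :: rest := by
    have : N = ((N.toNat : Nat) : Int) := by omega
    rw [this, PySem.List.slice_to_natCast]
    exact List.take_of_length_le (by simp at hN ⊢; omega)
  have hs : PySem.List.sorted (c :: rest) (fun x => x) false ≠ c :: rest := by
    intro h; exact hch ((sorted_fix_iff _).mp h)
  simp only [find_color_order, find_color_order_alt, hbridge, hslice,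
    PySem.List.pyGetD_zero_cons, if_pos h1']
  simp [runList_imp, hbad, hs]

-- ===== VERDICT (by name: the statement is the Claim_ definition above) =====
theorem find_color_order_spec : Claim_equal_find_color_order := by
  intro N colors _ hpre
  by_cases hle : N ≤ (colors.length : Int)
  · exact find_color_order_eq_alt N colors hpre.1 hle
  · have hgt : (colors.length : Int) < N := by omega
    exact find_color_order_eq_alt_big N colors hpre.1 hgt
      (hpre.2.resolve_left hle)
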